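-- pv_equiv track=rewrite | github.com/Liel-leman/Geometric-Calibrator | Experiments/utils.py | order_by
-- ===== SOURCE A (Python) =====
-- def order_by(indexes,order,second_order):
--     ans = []
--     first_sort = []
--     for p in order:
--         first_sort.append([item for item in indexes if item.startswith(p)])
--     for lst in first_sort:
--         for p in second_order:
--             ans.extend([item for item in lst if item.endswith(p)])
--     return ans
-- ===== SOURCE B (Python) =====
-- def order_by(indexes, order, second_order):
--     buckets = {}
--     for item in indexes:
--         ps = [i for i, p in enumerate(order) if item.startswith(p)]
--         qs = [j for j, q in enumerate(second_order) if item.endswith(q)]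
--         for i in ps:
--             for j in qs:
--                 buckets.setdefault((i, j), []).append(item)
--     out = []
--     for i in range(len(order)):
--         for j in range(len(second_order)):
--             out.extend(buckets.get((i, j), []))
--     return out
-- ===== Notes on version B (the rewrite author's own statement) =====
-- stated objective: alternative
-- what changed: Replaces A's two-phase structure (materialize a list of prefix buckets, then re-filter each bucket per suffix) with a single pass over the items that tests each item's prefixes and suffixes once, buckets it under every matching (prefix-index, suffix-index) key, and concatenates the buckets in order.
import Mathlib
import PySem

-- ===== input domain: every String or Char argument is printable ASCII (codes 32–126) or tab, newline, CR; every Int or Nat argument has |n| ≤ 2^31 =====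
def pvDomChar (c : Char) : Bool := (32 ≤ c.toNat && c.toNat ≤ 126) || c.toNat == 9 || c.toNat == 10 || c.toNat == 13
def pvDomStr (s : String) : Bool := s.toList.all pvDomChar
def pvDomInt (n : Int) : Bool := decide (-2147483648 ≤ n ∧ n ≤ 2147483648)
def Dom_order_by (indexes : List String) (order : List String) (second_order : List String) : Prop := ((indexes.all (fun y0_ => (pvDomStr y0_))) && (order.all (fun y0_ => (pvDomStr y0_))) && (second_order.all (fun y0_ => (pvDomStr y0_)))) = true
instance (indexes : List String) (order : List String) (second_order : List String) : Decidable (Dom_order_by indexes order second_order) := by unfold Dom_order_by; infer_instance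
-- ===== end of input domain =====

-- B replaces A's two-phase prefix-bucket/suffix-pass structure with a single pass over the
-- items that buckets each item under every matching (prefix-index, suffix-index) key, then
-- concatenates the buckets in order; objective: a different (bucketing) algorithm.

-- ===== PORT A =====
def order_by (indexes : List String) (order : List String) (second_order : List String) : List String :=
  let first_sort : List (List String) :=
    order.foldl (fun acc p => acc ++ [indexes.filter (fun item => PySem.Str.startswith item p)]) []
  first_sort.foldl (fun ans lst =>
    second_order.foldl (fun ans p =>
      ans ++ lst.filter (fun item => PySem.Str.endswith item p)) ans) []

-- ===== PORT B =====
def order_by_alt (indexes : List String) (order : List String) (second_order : List String) : List String :=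
  let buckets : PySem.Dict (Int × Int) (List String) :=
    indexes.foldl (fun buckets item =>
      let ps := ((PySem.List.enumerate order).filter (fun e => PySem.Str.startswith item e.2)).map (fun e => e.1)
      let qs := ((PySem.List.enumerate second_order).filter (fun e => PySem.Str.endswith item e.2)).map (fun e => e.1)
      ps.foldl (fun b i =>
        qs.foldl (fun b j => b.modify (i, j) [] (fun l => l ++ [item])) b) buckets)
      PySem.Dict.empty
  (PySem.List.pyRange 0 (order.length : Int) 1).foldl (fun out i =>
    (PySem.List.pyRange 0 (second_order.length : Int) 1).foldl (fun out j =>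
      out ++ buckets.getD (i, j) []) out) []

-- ===== PRECONDITION & SPEC =====
def Spec_order_by (indexes : List String) (order : List String) (second_order : List String) (out : List String) : Prop := out = order_by_alt indexes order second_order
instance (indexes : List String) (order : List String) (second_order : List String) (out : List String) : Decidable (Spec_order_by indexes order second_order out) := by unfold Spec_order_by; infer_instance

-- ===== CLAIM (what is proved, stated in full; the proofs are below) =====
def Claim_equal_order_by : Prop := ∀ (indexes : List String) (order : List String) (second_order : List String), Dom_order_by indexes order second_order → Spec_order_by indexes order second_order (order_by indexes order second_order)

-- ===== LEMMAS AND PROOFS =====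

-- A's two phases reduce to a nested flatMap of conjunctive filters.
lemma a_eq_flatMap (indexes order second_order : List String) :
    order_by indexes order second_order
      = order.flatMap (fun p => second_order.flatMap (fun q =>
          indexes.filter (fun item => PySem.Str.startswith item p && PySem.Str.endswith item q))) := by
  unfold order_by
  simp only [PySem.List.foldl_append_singleton_eq_map, List.nil_append,
    PySem.List.foldl_append_eq_flatMap, List.flatMap_map]
  refine List.flatMap_congr (fun p _ => ?_)
  refine List.flatMap_congr (fun q _ => ?_)
  rw [List.filter_filter]
  exact List.filter_congr (fun x _ => by rw [Bool.and_comm])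

-- one modify-append step per key of a duplicate-free key list
lemma getD_foldl_modify_append (item : String) (l : List (Int × Int)) (hl : l.Nodup)
    (d : PySem.Dict (Int × Int) (List String)) (k : Int × Int) :
    (l.foldl (fun b j => b.modify j [] (fun s => s ++ [item])) d).getD k []
      = d.getD k [] ++ (if k ∈ l then [item] else []) := by
  induction l generalizing d with
  | nil => simp
  | cons j l ih =>
    rw [List.foldl_cons, ih (List.nodup_cons.mp hl).2, PySem.Dict.getD_modify]
    rcases eq_or_ne k j with rfl | hkj
    · have : k ∉ l := (List.nodup_cons.mp hl).1
      simp [this]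
    · simp [hkj, List.mem_cons]

lemma nodup_map_fst_filter_enumerate (l : List String) (p : Int × String → Bool) :
    (((PySem.List.enumerate l).filter p).map (fun e => e.1)).Nodup := by
  have h := (PySem.List.pairwise_lt_enumerate (xs := l) (s := 0)).filter p
  rw [List.nodup_iff_pairwise_ne, List.pairwise_map]
  exact h.imp (fun hlt => ne_of_lt hlt)

lemma mem_map_fst_filter_enumerate (l : List String) (p : String → Bool) (a : Nat) (ha : a < l.length) :
    ((a : Int) ∈ ((PySem.List.enumerate l).filter (fun e => p e.2)).map (fun e => e.1)) ↔ p l[a] := by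
  constructor
  · rintro h
    obtain ⟨e, he, hfst⟩ := List.mem_map.mp h
    obtain ⟨he, hp⟩ := List.mem_filter.mp he
    obtain ⟨k, hk, rfl⟩ := (PySem.List.mem_enumerate_iff _ _ _).mp he
    simp only [zero_add] at hfst
    have : k = a := by exact_mod_cast hfst
    subst this
    simpa using hp
  · intro hp
    refine List.mem_map.mpr ⟨((a : Int), l[a]), List.mem_filter.mpr ⟨?_, by simpa using hp⟩, rfl⟩
    exact (PySem.List.mem_enumerate_iff _ _ _).mpr ⟨a, ha, by simp⟩

-- the nested per-item update, read back at any key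
lemma getD_foldl2_modify (item : String) (ps qs : List Int) (hps : ps.Nodup) (hqs : qs.Nodup)
    (d : PySem.Dict (Int × Int) (List String)) (k : Int × Int) :
    (ps.foldl (fun b i =>
        qs.foldl (fun b j => b.modify (i, j) [] (fun s => s ++ [item])) b) d).getD k []
      = d.getD k [] ++ (if k.1 ∈ ps ∧ k.2 ∈ qs then [item] else []) := by
  induction ps generalizing d with
  | nil => simp
  | cons i ps ih =>
    rw [List.foldl_cons, ih (List.nodup_cons.mp hps).2]
    have hmap : (qs.foldl (fun b j => b.modify (i, j) [] (fun s => s ++ [item])) d)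
        = ((qs.map (fun j => ((i : Int), j))).foldl (fun b j => b.modify j [] (fun s => s ++ [item])) d) := by
      rw [List.foldl_map]
    rw [hmap, getD_foldl_modify_append item _ (hqs.map (fun _ _ h => congrArg Prod.snd h)) d k]
    have hmem : (k ∈ qs.map (fun j => ((i : Int), j))) ↔ (k.1 = i ∧ k.2 ∈ qs) := by
      constructor
      · rintro h
        obtain ⟨j, hj, rfl⟩ := List.mem_map.mp h
        exact ⟨rfl, hj⟩
      · rintro ⟨h1, h2⟩
        exact List.mem_map.mpr ⟨k.2, h2, by rw [← h1]⟩
    rcases eq_or_ne k.1 i with hk1 | hk1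
    · have : k.1 ∉ ps := hk1 ▸ (List.nodup_cons.mp hps).1
      simp [hmem, hk1, List.mem_cons]
      exact fun h => absurd (hk1 ▸ h : k.1 ∈ ps) this
    · simp [hmem, hk1, List.mem_cons]

-- direct (un-mapped) form of getD_foldl2_modify, over the filtered enumerations themselves
lemma getD_enumfoldl_modify (item : String) (l1 l2 : List (Int × String))
    (h1 : (l1.map (fun e => e.1)).Nodup) (h2 : (l2.map (fun e => e.1)).Nodup)
    (d : PySem.Dict (Int × Int) (List String)) (k : Int × Int) :
    (l1.foldl (fun x y =>
        l2.foldl (fun x y1 => x.modify (y.1, y1.1) [] (fun s => s ++ [item])) x) d).getD k []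
      = d.getD k [] ++ (if k.1 ∈ l1.map (fun e => e.1) ∧ k.2 ∈ l2.map (fun e => e.1) then [item] else []) := by
  have h := getD_foldl2_modify item (l1.map (fun e => e.1)) (l2.map (fun e => e.1)) h1 h2 d k
  simp only [List.foldl_map] at h
  exact h

-- the bucket at a valid key pair is the conjunctive filter, in item order
lemma bucket_getD (indexes order second_order : List String) (a b : Nat)
    (ha : a < order.length) (hb : b < second_order.length)
    (d : PySem.Dict (Int × Int) (List String)) :
    ((indexes.foldl (fun buckets item =>
        ((PySem.List.enumerate order).filter (fun e => PySem.Str.startswith item e.2)).foldl (fun x y =>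
          ((PySem.List.enumerate second_order).filter (fun e => PySem.Str.endswith item e.2)).foldl
            (fun x y1 => x.modify (y.1, y1.1) [] (fun l => l ++ [item])) x) buckets) d).getD ((a : Int), (b : Int)) [])
      = d.getD ((a : Int), (b : Int)) []
        ++ indexes.filter (fun item => PySem.Str.startswith item order[a] && PySem.Str.endswith item second_order[b]) := by
  induction indexes generalizing d with
  | nil => simp
  | cons item xs ih =>
    rw [List.foldl_cons, ih]
    rw [getD_enumfoldl_modify item _ _
      (nodup_map_fst_filter_enumerate order _) (nodup_map_fst_filter_enumerate second_order _) d]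
    rw [List.filter_cons]
    simp only [mem_map_fst_filter_enumerate order (fun it => PySem.Str.startswith item it) a ha,
      mem_map_fst_filter_enumerate second_order (fun it => PySem.Str.endswith item it) b hb]
    by_cases h1 : PySem.Chars.startswith item.toList order[a].toList <;>
      by_cases h2 : PySem.Chars.endswith item.toList second_order[b].toList <;>
      simp [h1, h2, PySem.Str.startswith_eq, PySem.Str.endswith_eq]

-- indexing a list by range recovers flatMap over the list itself
lemma flatMap_range_getD {α β : Type} (l : List α) (x0 : α) (f : α → List β) :
    (List.range l.length).flatMap (fun a => f (l.getD a x0)) = l.flatMap f := by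
  induction l with
  | nil => simp
  | cons x xs ih =>
    rw [List.length_cons, List.range_succ_eq_map, List.flatMap_cons, List.flatMap_map]
    simp only [List.getD_cons_zero, List.getD_cons_succ, List.flatMap_cons]
    rw [ih]

theorem order_by_equal (indexes order second_order : List String) :
    order_by indexes order second_order = order_by_alt indexes order second_order := by
  rw [a_eq_flatMap]
  symm
  unfold order_by_alt
  simp only [PySem.List.pyRange_zero_natCast, List.foldl_map,
    PySem.List.foldl_append_eq_flatMap, List.nil_append]
  rw [← flatMap_range_getD order "" (fun p => second_order.flatMap (fun q =>
        indexes.filter (fun item => PySem.Str.startswith item p && PySem.Str.endswith item q)))]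
  refine List.flatMap_congr (fun a hamem => ?_)
  have ha : a < order.length := List.mem_range.mp hamem
  rw [← flatMap_range_getD second_order "" (fun q =>
        indexes.filter (fun item => PySem.Str.startswith item (order.getD a "") && PySem.Str.endswith item q))]
  refine List.flatMap_congr (fun b hbmem => ?_)
  have hb : b < second_order.length := List.mem_range.mp hbmem
  rw [bucket_getD indexes order second_order a b ha hb, PySem.Dict.getD_empty, List.nil_append,
    List.getD_eq_getElem _ _ ha, List.getD_eq_getElem _ _ hb]

-- ===== VERDICT (by name: the statement is the Claim_ definition above) =====
theorem order_by_spec : Claim_equal_order_by := by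
  intro indexes order second_order _
  exact order_by_equal indexes order second_order
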